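-- pv_equiv track=rewrite | github.com/TulsiBasetti/SQL_Explanation_-_Generator | main.py | parse_generated_output
-- ===== SOURCE A (Python) =====
-- def parse_generated_output(output):
--
--     if "Assumptions:" in output:
--         parts = output.split("SQL Query:")
--         if len(parts) == 2:
--             assumptions = parts[0].replace("Assumptions:", "").strip()
--             sql_query = parts[1].strip()
--             return assumptions, sql_query
--
--     lines = output.split('\n')
--     assumptions_lines = []
--     sql_lines = []
--     in_sql = False
--
--     for line in lines:
--         if line.strip().startswith("SELECT") or line.strip().startswith("select") or line.strip().startswith("WITH"):
--             in_sql = True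
--         if in_sql:
--             sql_lines.append(line)
--         else:
--             assumptions_lines.append(line)
--
--     assumptions = '\n'.join(assumptions_lines).strip()
--     sql_query = '\n'.join(sql_lines).strip()
--
--     return assumptions, sql_query
-- ===== SOURCE B (Python) =====
-- def parse_generated_output(output):
--     if "Assumptions:" in output:
--         parts = output.split("SQL Query:")
--         if len(parts) == 2:
--             return parts[0].replace("Assumptions:", "").strip(), parts[1].strip()
--
--     lines = output.split('\n')
--     i = next((k for k, line in enumerate(lines)
--               if line.strip().startswith(("SELECT", "select", "WITH"))),
--              len(lines))
--     return '\n'.join(lines[:i]).strip(), '\n'.join(lines[i:]).strip()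
-- ===== Notes on version B (the rewrite author's own statement) =====
-- stated objective: simpler
-- what changed: The fallback's sticky-flag loop with two accumulator lists is replaced by finding the index of the first SQL-looking line and slicing the line list there.
import Mathlib
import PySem

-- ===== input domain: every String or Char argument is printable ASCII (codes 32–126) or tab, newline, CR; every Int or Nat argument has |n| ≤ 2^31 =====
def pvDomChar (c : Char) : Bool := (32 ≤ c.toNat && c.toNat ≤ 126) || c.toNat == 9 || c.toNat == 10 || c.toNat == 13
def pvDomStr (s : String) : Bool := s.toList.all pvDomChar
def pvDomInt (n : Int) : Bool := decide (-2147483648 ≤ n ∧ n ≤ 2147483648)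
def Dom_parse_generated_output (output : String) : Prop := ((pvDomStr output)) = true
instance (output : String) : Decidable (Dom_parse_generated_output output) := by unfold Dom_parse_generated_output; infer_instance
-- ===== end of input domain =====

-- B replaces A's sticky-flag two-accumulator fallback loop by a boundary find-then-slice; same values, simpler shape.

-- ===== PORT A =====
-- line.strip().startswith("SELECT") or … "select" or … "WITH"
def pGOpredA (line : String) : Bool :=
  PySem.Str.startswith (PySem.Str.strip line) "SELECT" ||
  PySem.Str.startswith (PySem.Str.strip line) "select" ||
  PySem.Str.startswith (PySem.Str.strip line) "WITH"

-- the for-loop over lines with state (assumptions_lines, sql_lines, in_sql)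
def pGOloopA : List String → List String → List String → Bool → List String × List String
  | [], aLs, sLs, _ => (aLs, sLs)
  | l :: rest, aLs, sLs, inSql =>
    let inSql' := if pGOpredA l then true else inSql
    if inSql' then pGOloopA rest aLs (sLs ++ [l]) true
    else pGOloopA rest (aLs ++ [l]) sLs false

-- the code after the first (possibly returning) branch
def pGOfallbackA (output : String) : String × String :=
  let lines := (PySem.Str.split? output "\n").getD []
  let (aLs, sLs) := pGOloopA lines [] [] false
  (PySem.Str.strip (PySem.Str.join "\n" aLs), PySem.Str.strip (PySem.Str.join "\n" sLs))

def parse_generated_output (output : String) : String × String :=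
  if PySem.Str.isIn "Assumptions:" output then
    let parts := (PySem.Str.split? output "SQL Query:").getD []
    if parts.length == 2 then
      (PySem.Str.strip (PySem.Str.replace (parts.getD 0 "") "Assumptions:" ""),
       PySem.Str.strip (parts.getD 1 ""))
    else pGOfallbackA output
  else pGOfallbackA output

-- ===== PORT B =====
-- line.strip().startswith(("SELECT", "select", "WITH"))
def pGOpredB (line : String) : Bool :=
  let t := PySem.Str.strip line
  PySem.Str.startswith t "SELECT" || PySem.Str.startswith t "select" ||
  PySem.Str.startswith t "WITH"

-- next((k for k, line in enumerate(lines) if …), len(lines)); then slice at that boundary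
def pGOfallbackB (output : String) : String × String :=
  let lines := (PySem.Str.split? output "\n").getD []
  let i := (lines.findIdx? pGOpredB).getD lines.length
  (PySem.Str.strip (PySem.Str.join "\n" (lines.take i)),
   PySem.Str.strip (PySem.Str.join "\n" (lines.drop i)))

def parse_generated_output_alt (output : String) : String × String :=
  if PySem.Str.isIn "Assumptions:" output then
    let parts := (PySem.Str.split? output "SQL Query:").getD []
    if parts.length == 2 then
      (PySem.Str.strip (PySem.Str.replace (parts.getD 0 "") "Assumptions:" ""),
       PySem.Str.strip (parts.getD 1 ""))
    else pGOfallbackB output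
  else pGOfallbackB output

-- ===== PRECONDITION & SPEC =====
def Spec_parse_generated_output (output : String) (out : String × String) : Prop := out = parse_generated_output_alt output
instance (output : String) (out : String × String) : Decidable (Spec_parse_generated_output output out) := by unfold Spec_parse_generated_output; infer_instance

-- ===== CLAIM (what is proved, stated in full; the proofs are below) =====
def Claim_equal_parse_generated_output : Prop := ∀ (output : String), Dom_parse_generated_output output → Spec_parse_generated_output output (parse_generated_output output)

-- ===== LEMMAS AND PROOFS =====

theorem pGOpred_eq (l : String) : pGOpredA l = pGOpredB l := rfl

-- once in_sql is true, every remaining line goes to sql_lines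
theorem pGOloopA_true (ls : List String) : ∀ aLs sLs,
    pGOloopA ls aLs sLs true = (aLs, sLs ++ ls) := by
  induction ls with
  | nil => simp [pGOloopA]
  | cons l rest ih =>
      intro aLs sLs
      simp [pGOloopA, ih]

-- with in_sql false, the loop splits the lines at the first SQL-looking line
theorem pGOloopA_false (ls : List String) : ∀ aLs sLs,
    pGOloopA ls aLs sLs false =
      (aLs ++ ls.take ((ls.findIdx? pGOpredA).getD ls.length),
       sLs ++ ls.drop ((ls.findIdx? pGOpredA).getD ls.length)) := by
  induction ls with
  | nil => simp [pGOloopA]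
  | cons l rest ih =>
      intro aLs sLs
      rw [List.findIdx?_cons]
      by_cases h : pGOpredA l = true
      · simp [pGOloopA, h, pGOloopA_true]
      · have h' : pGOpredA l = false := by simpa using h
        simp only [pGOloopA, h', Bool.false_eq_true, if_false, ih]
        cases rest.findIdx? pGOpredA <;>
          simp [List.take_succ_cons, List.drop_succ_cons, List.append_assoc]

theorem pGOfallback_eq (output : String) : pGOfallbackA output = pGOfallbackB output := by
  have hpred : pGOpredA = pGOpredB := funext pGOpred_eq
  simp [pGOfallbackA, pGOfallbackB, pGOloopA_false, hpred]

-- ===== VERDICT (by name: the statement is the Claim_ definition above) =====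
theorem parse_generated_output_spec : Claim_equal_parse_generated_output := by
  intro output _
  unfold Spec_parse_generated_output parse_generated_output parse_generated_output_alt
  split_ifs <;> simp [pGOfallback_eq]
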